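-- pv_equiv track=rewrite | github.com/carrickdb/ElementsOfProgrammingSolutions | 16.5-is_string_in_matrix.py | is_pattern_contained_in_grid
-- ===== SOURCE A (Python) =====
-- from typing import List
--
-- def is_pattern_contained_in_grid(grid: List[List[int]],
--                                  pattern: List[int]) -> bool:
--     v = set()
--     for i in range(len(grid)):
--         for j in range(len(grid[0])):
--             s = [(i,j,0)]
--             while s:
--                 curr = s.pop()
--                 if curr in v:
--                     continue
--                 v.add(curr)
--                 ci,cj,pattern_i = curr
--                 if pattern[pattern_i] == grid[ci][cj]:
--                     if pattern_i == len(pattern) - 1: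
--                         return True
--                     for di,dj in [(0,1), (1,0),(-1,0), (0,-1)]:
--                         ni,nj = ci+di, cj+dj
--                         if ni < 0 or ni >= len(grid):
--                             continue
--                         if nj < 0 or nj >= len(grid[0]):
--                             continue
--                         s.append((ni,nj, pattern_i+1))
--     return False
-- ===== SOURCE B (Python) =====
-- def is_pattern_contained_in_grid(grid, pattern):
--     # Backward dynamic programming over the pattern: cur holds the set of cells
--     # from which the pattern suffix starting at index k can be matched.
--     if not grid or not grid[0]:
--         return False
--     rows, cols = len(grid), len(grid[0])
--     cells = [(i, j) for i in range(rows) for j in range(cols)]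
--     cur = {c for c in cells if grid[c[0]][c[1]] == pattern[-1]}
--     for x in reversed(pattern[:-1]):
--         cur = {(i, j) for (i, j) in cells
--                if grid[i][j] == x
--                and any((i + di, j + dj) in cur
--                        for di, dj in ((0, 1), (1, 0), (-1, 0), (0, -1)))}
--     return bool(cur)
-- ===== Notes on version B (the rewrite author's own statement) =====
-- stated objective: alternative
-- what changed: Replaces A's multi-start DFS with an explicit stack and a shared visited set by a backward dynamic program over the pattern: it iterates the pattern back-to-front maintaining the set of cells from which the remaining suffix can be matched, and returns whether that set is nonempty; unlike A it has no early exit, so it always pays the full rows*cols*len(pattern) cost.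
-- outside the precondition, e.g. on is_pattern_contained_in_grid([[1, 2], [3]], [1, 2]): A returns True, B raises IndexError
import Mathlib
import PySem

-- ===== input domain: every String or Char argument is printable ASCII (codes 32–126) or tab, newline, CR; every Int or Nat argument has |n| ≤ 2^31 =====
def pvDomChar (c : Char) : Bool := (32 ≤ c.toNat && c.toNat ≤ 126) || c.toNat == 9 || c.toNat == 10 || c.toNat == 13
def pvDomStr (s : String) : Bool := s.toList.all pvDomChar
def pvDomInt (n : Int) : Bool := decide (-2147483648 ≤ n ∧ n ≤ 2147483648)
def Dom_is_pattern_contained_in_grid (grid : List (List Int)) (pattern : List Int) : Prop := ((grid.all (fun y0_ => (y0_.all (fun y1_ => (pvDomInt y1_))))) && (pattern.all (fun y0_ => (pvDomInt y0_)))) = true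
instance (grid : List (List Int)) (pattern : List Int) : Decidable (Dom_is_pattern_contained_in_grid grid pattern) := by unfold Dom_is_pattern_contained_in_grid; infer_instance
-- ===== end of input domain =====

-- B replaces A's multi-start stack DFS with a shared visited set by a backward dynamic
-- program over the pattern (set of cells from which each suffix can be matched): an
-- alternative algorithm of the same asymptotic cost.

-- ===== PORT A =====
-- the four neighbour offsets [(0,1),(1,0),(-1,0),(0,-1)] of the Python source
def pvDirs : List (Int × Int) := [(0,1), (1,0), (-1,0), (0,-1)]

-- 'pattern[pattern_i] == grid[ci][cj]'; a 'none' is where Python raises IndexError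
-- (empty pattern / a row shorter than row 0) — those inputs are outside Pre_.
def pvCellEq (grid : List (List Int)) (pattern : List Int) (st : Int × Int × Int) : Bool :=
  match PySem.List.pyGet? pattern st.2.2,
        (PySem.List.pyGet? grid st.1).bind (fun row => PySem.List.pyGet? row st.2.1) with
  | some p, some g => p == g
  | _, _ => false

-- the 'for di,dj in …: … s.append((ni,nj,pattern_i+1))' block (the pushes produced by one state);
-- pops are modelled at the head of the list, so the pushed block is reversed (s.pop() takes the last append first)
def pvSuccs (grid : List (List Int)) (st : Int × Int × Int) : List (Int × Int × Int) :=
  (pvDirs.foldl (fun acc d =>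
      if st.1 + d.1 < 0 ∨ (grid.length : Int) ≤ st.1 + d.1 then acc
      else if st.2.1 + d.2 < 0 ∨ ((grid.headD []).length : Int) ≤ st.2.1 + d.2 then acc
      else acc ++ [(st.1 + d.1, st.2.1 + d.2, st.2.2 + 1)]) []).reverse

-- the 'while s:' loop; fuel only makes it total (it provably never runs out inside the proofs below)
def pvLoopA (grid : List (List Int)) (pattern : List Int) :
    Nat → List (Int × Int × Int) → PySem.Set (Int × Int × Int) →
    Bool × PySem.Set (Int × Int × Int)
  | 0, _, v => (false, v)
  | _ + 1, [], v => (false, v)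
  | f + 1, st :: rest, v =>
      if PySem.Set.contains v st then pvLoopA grid pattern f rest v
      else if pvCellEq grid pattern st then
        if st.2.2 == (pattern.length : Int) - 1 then (true, PySem.Set.add v st)
        else pvLoopA grid pattern f (pvSuccs grid st ++ rest) (PySem.Set.add v st)
      else pvLoopA grid pattern f rest (PySem.Set.add v st)

def is_pattern_contained_in_grid (grid : List (List Int)) (pattern : List Int) : Bool :=
  -- len(grid[0]) is only evaluated by Python when the outer loop runs (grid ≠ []); headD models it
  let fuel := 5 * (grid.length * (grid.headD []).length * (pattern.length + 1) + 1) + 1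
  ((PySem.List.pyRange 0 (grid.length : Int)).foldl (fun acc i =>
      (PySem.List.pyRange 0 ((grid.headD []).length : Int)).foldl (fun acc2 j =>
        if acc2.1 then acc2          -- 'return True' already happened: both loops are exited
        else pvLoopA grid pattern fuel [(i, j, 0)] acc2.2) acc)
    (false, (PySem.Set.empty : PySem.Set (Int × Int × Int)))).1

-- ===== PORT B =====
-- 'grid[c[0]][c[1]] == x'; 'none' is where Python raises IndexError (short row) — outside Pre_
def pvHitB (grid : List (List Int)) (x : Int) (c : Int × Int) : Bool :=
  match (PySem.List.pyGet? grid c.1).bind (fun row => PySem.List.pyGet? row c.2) with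
  | some g => g == x
  | none => false

-- 'cells = [(i, j) for i in range(rows) for j in range(cols)]'
def pvCellsB (R C : Int) : List (Int × Int) :=
  (PySem.List.pyRange 0 R).flatMap (fun i => (PySem.List.pyRange 0 C).map (fun j => (i, j)))

-- one step of the backward DP: the set comprehension rebuilding cur for value x
def pvStepB (grid : List (List Int)) (cells : List (Int × Int))
    (cur : PySem.Set (Int × Int)) (x : Int) : PySem.Set (Int × Int) :=
  PySem.Set.ofList (cells.filter (fun c =>
    pvHitB grid x c && pvDirs.any (fun d => PySem.Set.contains cur (c.1 + d.1, c.2 + d.2))))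

def is_pattern_contained_in_grid_alt (grid : List (List Int)) (pattern : List Int) : Bool :=
  if grid.isEmpty || (grid.headD []).isEmpty then false
  else
    let cells := pvCellsB (grid.length : Int) ((grid.headD []).length : Int)
    -- '{c for c in cells if grid[c[0]][c[1]] == pattern[-1]}'; pattern[-1] raises on empty pattern (outside Pre_)
    let cur0 : PySem.Set (Int × Int) := PySem.Set.ofList (cells.filter (fun c =>
      match PySem.List.pyGet? pattern (-1) with
      | some x => pvHitB grid x c
      | none => false))
    -- 'for x in reversed(pattern[:-1])' — pattern[:-1] is dropLast
    (!((pattern.dropLast.reverse.foldl (pvStepB grid cells) cur0).isEmpty))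

-- ===== PRECONDITION & SPEC =====
-- Pre_ excludes (a) inputs where A raises IndexError: an empty pattern faced with a nonempty
-- first row, and most grids with a row shorter than row 0; and (b) the remaining short-row
-- grids, on which A happens to return True before touching the short row while B (which always
-- scans the whole rows*cols rectangle) raises IndexError there.
def Pre_is_pattern_contained_in_grid (grid : List (List Int)) (pattern : List Int) : Prop :=
  (∀ row ∈ grid, (grid.headD []).length ≤ row.length) ∧
  (grid ≠ [] → grid.headD [] ≠ [] → pattern ≠ [])

instance (grid : List (List Int)) (pattern : List Int) : Decidable (Pre_is_pattern_contained_in_grid grid pattern) := by unfold Pre_is_pattern_contained_in_grid; infer_instance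

def pvWitness_is_pattern_contained_in_grid : List (List Int) × List Int :=
  ([[1, 2], [3, 4]], [1, 2, 4])

def Spec_is_pattern_contained_in_grid (grid : List (List Int)) (pattern : List Int) (out : Bool) : Prop := out = is_pattern_contained_in_grid_alt grid pattern
instance (grid : List (List Int)) (pattern : List Int) (out : Bool) : Decidable (Spec_is_pattern_contained_in_grid grid pattern out) := by unfold Spec_is_pattern_contained_in_grid; infer_instance

-- ===== CLAIM (what is proved, stated in full; the proofs are below) =====
def Claim_equal_is_pattern_contained_in_grid : Prop := ∀ (grid : List (List Int)) (pattern : List Int), Dom_is_pattern_contained_in_grid grid pattern → Pre_is_pattern_contained_in_grid grid pattern → Spec_is_pattern_contained_in_grid grid pattern (is_pattern_contained_in_grid grid pattern)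

-- ===== LEMMAS AND PROOFS =====

-- in-bounds test for a cell
def pvInB (grid : List (List Int)) (i j : Int) : Bool :=
  decide (0 ≤ i) && decide (i < (grid.length : Int)) &&
  decide (0 ≤ j) && decide (j < ((grid.headD []).length : Int))

-- the common specification both ports are proved equal to: pvGood k i j decides whether
-- pattern[k:] can be matched along an adjacent path starting at cell (i,j)
def pvGood (grid : List (List Int)) (pattern : List Int) (k : Nat) (i j : Int) : Bool :=
  pvInB grid i j && pvCellEq grid pattern (i, j, (k : Int)) &&
    (if _h : k + 1 < pattern.length then
        pvDirs.any (fun d => pvGood grid pattern (k + 1) (i + d.1) (j + d.2))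
     else k + 1 == pattern.length)
termination_by pattern.length - k

def pvSpec (grid : List (List Int)) (pattern : List Int) : Bool :=
  (pvCellsB (grid.length : Int) ((grid.headD []).length : Int)).any
    (fun c => pvGood grid pattern 0 c.1 c.2)

-- basic pyGet? facts
theorem pvGet_pos (xs : List Int) (i : Int) (h : 0 ≤ i) (h2 : i < xs.length) :
    PySem.List.pyGet? xs i = some (xs[i.toNat]'(by omega)) := by
  unfold PySem.List.pyGet? PySem.List.pyIdx?
  rw [if_pos h, if_pos h2]; simp

theorem pvGet_lt (xs : List Int) (i : Int) (a : Int) (h : 0 ≤ i)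
    (hg : PySem.List.pyGet? xs i = some a) : i < xs.length := by
  by_contra hc
  unfold PySem.List.pyGet? PySem.List.pyIdx? at hg
  rw [if_pos h, if_neg hc] at hg
  simp at hg

theorem pvGet_neg_one (xs : List Int) (h : xs ≠ []) :
    PySem.List.pyGet? xs (-1) = some (xs[xs.length - 1]'(by cases xs <;> simp_all)) := by
  unfold PySem.List.pyGet? PySem.List.pyIdx?
  have hl : 0 < xs.length := List.length_pos_iff.mpr h
  rw [if_neg (by omega), if_pos (by omega)]
  simp

theorem mem_pvCellsB (R C : Int) (c : Int × Int) :
    c ∈ pvCellsB R C ↔ (0 ≤ c.1 ∧ c.1 < R ∧ 0 ≤ c.2 ∧ c.2 < C) := by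
  simp only [pvCellsB, List.mem_flatMap, List.mem_map, PySem.List.mem_pyRange_one]
  constructor
  · rintro ⟨i, hi, j, hj, rfl⟩; exact ⟨hi.1, hi.2, hj.1, hj.2⟩
  · rintro ⟨h1, h2, h3, h4⟩; exact ⟨c.1, ⟨h1, h2⟩, c.2, ⟨h3, h4⟩, rfl⟩

-- pvGood structural facts
theorem pvGood_eq (grid : List (List Int)) (pattern : List Int) (k : Nat) (i j : Int) :
    pvGood grid pattern k i j =
      (pvInB grid i j && pvCellEq grid pattern (i, j, (k : Int)) &&
        (if k + 1 < pattern.length then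
            pvDirs.any (fun d => pvGood grid pattern (k + 1) (i + d.1) (j + d.2))
         else k + 1 == pattern.length)) := by
  rw [pvGood]
  rw [dite_eq_ite]

theorem pvGood_parts (grid : List (List Int)) (pattern : List Int) (k : Nat) (i j : Int)
    (h : pvGood grid pattern k i j = true) :
    pvInB grid i j = true ∧ pvCellEq grid pattern (i, j, (k : Int)) = true ∧ k < pattern.length := by
  rw [pvGood_eq] at h
  simp only [Bool.and_eq_true] at h
  refine ⟨h.1.1, h.1.2, ?_⟩
  split at h
  · omega
  · rcases h with ⟨-, h⟩; simp only [beq_iff_eq] at h; omega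

-- pvSuccs characterisation
theorem pvSuccs_eq (grid : List (List Int)) (st : Int × Int × Int) :
    pvSuccs grid st = ((pvDirs.filter (fun d => pvInB grid (st.1 + d.1) (st.2.1 + d.2))).map
      (fun d => (st.1 + d.1, st.2.1 + d.2, st.2.2 + 1))).reverse := by
  unfold pvSuccs
  congr 1
  rw [show (fun (acc : List (Int × Int × Int)) (d : Int × Int) =>
      if st.1 + d.1 < 0 ∨ (grid.length : Int) ≤ st.1 + d.1 then acc
      else if st.2.1 + d.2 < 0 ∨ ((grid.headD []).length : Int) ≤ st.2.1 + d.2 then acc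
      else acc ++ [(st.1 + d.1, st.2.1 + d.2, st.2.2 + 1)]) =
    (fun acc d => if pvInB grid (st.1 + d.1) (st.2.1 + d.2) = true then
        acc ++ [(st.1 + d.1, st.2.1 + d.2, st.2.2 + 1)] else acc) from ?_]
  · rw [PySem.List.foldl_append_if]
    simp
  · funext acc d
    by_cases h1 : st.1 + d.1 < 0 ∨ (grid.length : Int) ≤ st.1 + d.1
    · rw [if_pos h1, if_neg]
      simp only [pvInB, Bool.and_eq_true, decide_eq_true_eq]
      omega
    · rw [if_neg h1]
      by_cases h2 : st.2.1 + d.2 < 0 ∨ ((grid.headD []).length : Int) ≤ st.2.1 + d.2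
      · rw [if_pos h2, if_neg]
        simp only [pvInB, Bool.and_eq_true, decide_eq_true_eq]
        omega
      · rw [if_neg h2, if_pos]
        simp only [pvInB, Bool.and_eq_true, decide_eq_true_eq]
        omega

theorem mem_pvSuccs (grid : List (List Int)) (st y : Int × Int × Int) :
    y ∈ pvSuccs grid st ↔ ∃ d ∈ pvDirs, pvInB grid (st.1 + d.1) (st.2.1 + d.2) = true ∧
      y = (st.1 + d.1, st.2.1 + d.2, st.2.2 + 1) := by
  rw [pvSuccs_eq]
  simp only [List.mem_reverse, List.mem_map, List.mem_filter]
  constructor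
  · rintro ⟨d, ⟨hd, hb⟩, rfl⟩; exact ⟨d, hd, hb, rfl⟩
  · rintro ⟨d, hd, hb, rfl⟩; exact ⟨d, ⟨hd, hb⟩, rfl⟩

theorem pvSuccs_len (grid : List (List Int)) (st : Int × Int × Int) :
    (pvSuccs grid st).length ≤ 4 := by
  rw [pvSuccs_eq, List.length_reverse, List.length_map]
  calc (pvDirs.filter _).length ≤ pvDirs.length := List.length_filter_le _ _
    _ = 4 := rfl

-- the finite state space, for the fuel bound
def pvGamma (grid : List (List Int)) (pattern : List Int) : List (Int × Int × Int) :=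
  (List.range grid.length).flatMap fun (i : Nat) =>
    (List.range (grid.headD []).length).flatMap fun (j : Nat) =>
      (List.range (pattern.length + 1)).map fun (k : Nat) => ((i : Int), (j : Int), (k : Int))

def pvBoxP (grid : List (List Int)) (pattern : List Int) (st : Int × Int × Int) : Prop :=
  0 ≤ st.1 ∧ st.1 < (grid.length : Int) ∧ 0 ≤ st.2.1 ∧ st.2.1 < ((grid.headD []).length : Int) ∧
  0 ≤ st.2.2 ∧ st.2.2 ≤ (pattern.length : Int)

theorem mem_pvGamma (grid : List (List Int)) (pattern : List Int) (st : Int × Int × Int) :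
    st ∈ pvGamma grid pattern ↔ pvBoxP grid pattern st := by
  constructor
  · intro h
    rcases List.mem_flatMap.mp h with ⟨i, hi, h2⟩
    rcases List.mem_flatMap.mp h2 with ⟨j, hj, h3⟩
    rcases List.mem_map.mp h3 with ⟨k, hk, rfl⟩
    rw [List.mem_range] at hi hj hk
    refine ⟨?_, ?_, ?_, ?_, ?_, ?_⟩ <;> dsimp only [pvBoxP] <;> omega
  · rintro ⟨h1, h2, h3, h4, h5, h6⟩
    refine List.mem_flatMap.mpr ⟨st.1.toNat, List.mem_range.mpr (by omega), ?_⟩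
    refine List.mem_flatMap.mpr ⟨st.2.1.toNat, List.mem_range.mpr (by omega), ?_⟩
    refine List.mem_map.mpr ⟨st.2.2.toNat, List.mem_range.mpr (by omega), ?_⟩
    obtain ⟨a, b, c⟩ := st
    simp only at h1 h2 h3 h4 h5 h6 ⊢
    rw [Int.toNat_of_nonneg h1, Int.toNat_of_nonneg h3, Int.toNat_of_nonneg h5]

theorem pvGamma_len (grid : List (List Int)) (pattern : List Int) :
    (pvGamma grid pattern).length = grid.length * (grid.headD []).length * (pattern.length + 1) := by
  simp [pvGamma, List.length_flatMap]
  ring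

def pvMu (grid : List (List Int)) (pattern : List Int)
    (v s : List (Int × Int × Int)) : Nat :=
  5 * ((pvGamma grid pattern).length + 1 - v.length) + s.length

theorem pvLen_le (grid : List (List Int)) (pattern : List Int) (v : List (Int × Int × Int))
    (hn : v.Nodup) (hb : ∀ x ∈ v, pvBoxP grid pattern x) :
    v.length ≤ (pvGamma grid pattern).length := by
  have hsub : v ⊆ pvGamma grid pattern := fun x hx => (mem_pvGamma _ _ _).mpr (hb x hx)
  exact (List.Subperm.length_le (List.subperm_of_subset hn hsub))

theorem pvAdd_len (v : PySem.Set (Int × Int × Int)) (st : Int × Int × Int)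
    (h : st ∉ v) : (PySem.Set.add v st).length = v.length + 1 := by
  simp [PySem.Set.add, h]

theorem pvCellEq_k_lt (grid : List (List Int)) (pattern : List Int) (st : Int × Int × Int)
    (h0 : 0 ≤ st.2.2) (h : pvCellEq grid pattern st = true) : st.2.2 < (pattern.length : Int) := by
  unfold pvCellEq at h
  split at h
  · next p g hp _ => exact pvGet_lt pattern st.2.2 p h0 hp
  · simp at h

theorem pvSuccs_box (grid : List (List Int)) (pattern : List Int) (st y : Int × Int × Int)
    (hb : pvBoxP grid pattern st) (hc : pvCellEq grid pattern st = true)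
    (hy : y ∈ pvSuccs grid st) : pvBoxP grid pattern y := by
  rcases (mem_pvSuccs grid st y).mp hy with ⟨d, _, hin, rfl⟩
  have hk := pvCellEq_k_lt grid pattern st hb.2.2.2.2.1 hc
  simp only [pvInB, Bool.and_eq_true, decide_eq_true_eq] at hin
  obtain ⟨h1, h2, h3, h4, h5, h6⟩ := hb
  obtain ⟨⟨⟨g1, g2⟩, g3⟩, g4⟩ := hin
  refine ⟨?_, ?_, ?_, ?_, ?_, ?_⟩ <;> dsimp only [pvBoxP] <;> omega

-- master lemma for the 'while' loop with result False
theorem pvLoopA_false (grid : List (List Int)) (pattern : List Int) :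
    ∀ (f : Nat) (s : List (Int × Int × Int)) (v v' : PySem.Set (Int × Int × Int)),
    pvLoopA grid pattern f s v = (false, v') →
    (∀ x ∈ s, pvBoxP grid pattern x) →
    (∀ x ∈ v, pvBoxP grid pattern x) →
    List.Nodup v →
    pvMu grid pattern v s ≤ f →
    (∀ x ∈ v, pvCellEq grid pattern x = true → x.2.2 ≠ (pattern.length : Int) - 1 ∧
        ∀ y ∈ pvSuccs grid x, y ∈ v ∨ y ∈ s) →
    List.Nodup v' ∧ (∀ x ∈ v', pvBoxP grid pattern x) ∧ (∀ x ∈ v, x ∈ v') ∧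
      (∀ x ∈ s, x ∈ v') ∧
      (∀ x ∈ v', pvCellEq grid pattern x = true → x.2.2 ≠ (pattern.length : Int) - 1 ∧
        ∀ y ∈ pvSuccs grid x, y ∈ v') := by
  intro f
  induction f with
  | zero =>
    intro s v v' he hs hv hn hmu hSC
    have hs0 : s = [] := by
      unfold pvMu at hmu
      exact List.length_eq_zero_iff.mp (by omega)
    subst hs0
    rw [show pvLoopA grid pattern 0 [] v = (false, v) from rfl] at he
    injection he with _ h2
    subst h2
    refine ⟨hn, hv, fun x hx => hx, by simp, fun x hx hc => ?_⟩
    refine ⟨(hSC x hx hc).1, fun y hy => ?_⟩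
    rcases (hSC x hx hc).2 y hy with h | h
    · exact h
    · simp at h
  | succ f ih =>
    intro s v v' he hs hv hn hmu hSC
    cases s with
    | nil =>
      rw [show pvLoopA grid pattern (f + 1) [] v = (false, v) from rfl] at he
      injection he with _ h2
      subst h2
      refine ⟨hn, hv, fun x hx => hx, by simp, fun x hx hc => ?_⟩
      refine ⟨(hSC x hx hc).1, fun y hy => ?_⟩
      rcases (hSC x hx hc).2 y hy with h | h
      · exact h
      · simp at h
    | cons st rest =>
      have hstb : pvBoxP grid pattern st := hs st (by simp)
      have hrest : ∀ x ∈ rest, pvBoxP grid pattern x := fun x hx => hs x (by simp [hx])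
      have hvleN := pvLen_le grid pattern v hn hv
      simp only [pvLoopA] at he
      by_cases hmem : st ∈ v
      · have hcont : PySem.Set.contains v st = true := by
          rw [PySem.Set.contains_eq_decide]; exact decide_eq_true hmem
        rw [if_pos hcont] at he
        have hmu2 : pvMu grid pattern v rest ≤ f := by
          unfold pvMu at hmu ⊢; simp only [List.length_cons] at hmu; omega
        have hSC2 : ∀ x ∈ v, pvCellEq grid pattern x = true →
            x.2.2 ≠ (pattern.length : Int) - 1 ∧ ∀ y ∈ pvSuccs grid x, y ∈ v ∨ y ∈ rest := by
          intro x hx hc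
          refine ⟨(hSC x hx hc).1, fun y hy => ?_⟩
          rcases (hSC x hx hc).2 y hy with h | h
          · exact Or.inl h
          · rcases List.mem_cons.mp h with rfl | h'
            · exact Or.inl hmem
            · exact Or.inr h'
        obtain ⟨c1, c2, c3, c4, c5⟩ := ih rest v v' he hrest hv hn hmu2 hSC2
        refine ⟨c1, c2, c3, fun x hx => ?_, c5⟩
        rcases List.mem_cons.mp hx with rfl | hx'
        · exact c3 _ hmem
        · exact c4 _ hx'
      · have hcont : PySem.Set.contains v st = false := by
          rw [PySem.Set.contains_eq_decide]; exact decide_eq_false hmem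
        rw [if_neg (by simp only [hcont]; exact Bool.false_ne_true)] at he
        have hm2 : ∀ x ∈ PySem.Set.add v st, pvBoxP grid pattern x := by
          intro x hx
          rcases (PySem.Set.mem_add v st x).mp hx with h | rfl
          · exact hv x h
          · exact hstb
        have hn2 := PySem.Set.nodup_add v st hn
        have hlen2 : (PySem.Set.add v st).length = v.length + 1 := pvAdd_len v st hmem
        by_cases hce : pvCellEq grid pattern st = true
        · rw [if_pos hce] at he
          by_cases hfin : (st.2.2 == (pattern.length : Int) - 1) = true
          · rw [if_pos hfin] at he; simp at he
          · rw [if_neg hfin] at he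
            have hkne : st.2.2 ≠ (pattern.length : Int) - 1 := by
              simpa using hfin
            have hs2 : ∀ x ∈ pvSuccs grid st ++ rest, pvBoxP grid pattern x := by
              intro x hx
              rcases List.mem_append.mp hx with h | h
              · exact pvSuccs_box grid pattern st x hstb hce h
              · exact hrest x h
            have hmu2 : pvMu grid pattern (PySem.Set.add v st) (pvSuccs grid st ++ rest) ≤ f := by
              have hsl := pvSuccs_len grid st
              unfold pvMu at hmu ⊢
              rw [hlen2]
              simp only [List.length_append, List.length_cons] at hmu ⊢
              omega
            have hSC2 : ∀ x ∈ PySem.Set.add v st, pvCellEq grid pattern x = true →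
                x.2.2 ≠ (pattern.length : Int) - 1 ∧
                ∀ y ∈ pvSuccs grid x, y ∈ PySem.Set.add v st ∨ y ∈ pvSuccs grid st ++ rest := by
              intro x hx hc
              rcases (PySem.Set.mem_add v st x).mp hx with hxv | rfl
              · refine ⟨(hSC x hxv hc).1, fun y hy => ?_⟩
                rcases (hSC x hxv hc).2 y hy with h | h
                · exact Or.inl ((PySem.Set.mem_add v st y).mpr (Or.inl h))
                · rcases List.mem_cons.mp h with rfl | h'
                  · exact Or.inl ((PySem.Set.mem_add v y y).mpr (Or.inr rfl))
                  · exact Or.inr (List.mem_append.mpr (Or.inr h'))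
              · exact ⟨hkne, fun y hy => Or.inr (List.mem_append.mpr (Or.inl hy))⟩
            obtain ⟨c1, c2, c3, c4, c5⟩ := ih _ _ v' he hs2 hm2 hn2 hmu2 hSC2
            have hstv' : st ∈ v' := c3 _ ((PySem.Set.mem_add v st st).mpr (Or.inr rfl))
            refine ⟨c1, c2, fun x hx => c3 _ ((PySem.Set.mem_add v st x).mpr (Or.inl hx)),
              fun x hx => ?_, c5⟩
            rcases List.mem_cons.mp hx with rfl | hx'
            · exact hstv'
            · exact c4 _ (List.mem_append.mpr (Or.inr hx'))
        · rw [if_neg hce] at he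
          have hmu2 : pvMu grid pattern (PySem.Set.add v st) rest ≤ f := by
            unfold pvMu at hmu ⊢
            rw [hlen2]
            simp only [List.length_cons] at hmu
            omega
          have hSC2 : ∀ x ∈ PySem.Set.add v st, pvCellEq grid pattern x = true →
              x.2.2 ≠ (pattern.length : Int) - 1 ∧
              ∀ y ∈ pvSuccs grid x, y ∈ PySem.Set.add v st ∨ y ∈ rest := by
            intro x hx hc
            rcases (PySem.Set.mem_add v st x).mp hx with hxv | rfl
            · refine ⟨(hSC x hxv hc).1, fun y hy => ?_⟩
              rcases (hSC x hxv hc).2 y hy with h | h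
              · exact Or.inl ((PySem.Set.mem_add v st y).mpr (Or.inl h))
              · rcases List.mem_cons.mp h with rfl | h'
                · exact Or.inl ((PySem.Set.mem_add v y y).mpr (Or.inr rfl))
                · exact Or.inr h'
            · exact absurd hc hce
          obtain ⟨c1, c2, c3, c4, c5⟩ := ih _ _ v' he hrest hm2 hn2 hmu2 hSC2
          have hstv' : st ∈ v' := c3 _ ((PySem.Set.mem_add v st st).mpr (Or.inr rfl))
          refine ⟨c1, c2, fun x hx => c3 _ ((PySem.Set.mem_add v st x).mpr (Or.inl hx)),
            fun x hx => ?_, c5⟩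
          rcases List.mem_cons.mp hx with rfl | hx'
          · exact hstv'
          · exact c4 _ hx'

-- soundness of the 'while' loop with result True
def pvReachN (grid : List (List Int)) (pattern : List Int) : Nat → Int → Int → Prop
  | 0, i, j => pvInB grid i j = true
  | k + 1, i, j => pvInB grid i j = true ∧ ∃ d ∈ pvDirs,
      pvReachN grid pattern k (i - d.1) (j - d.2) ∧
      pvCellEq grid pattern (i - d.1, j - d.2, (k : Int)) = true

def pvReach (grid : List (List Int)) (pattern : List Int) (st : Int × Int × Int) : Prop :=
  ∃ k : Nat, st.2.2 = (k : Int) ∧ pvReachN grid pattern k st.1 st.2.1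

theorem pvReachN_inB (grid : List (List Int)) (pattern : List Int) (k : Nat) (i j : Int)
    (h : pvReachN grid pattern k i j) : pvInB grid i j = true := by
  cases k <;> (first | exact h | exact h.1)

theorem pvLoopA_true (grid : List (List Int)) (pattern : List Int) :
    ∀ (f : Nat) (s : List (Int × Int × Int)) (v v' : PySem.Set (Int × Int × Int)),
    pvLoopA grid pattern f s v = (true, v') →
    (∀ x ∈ s, pvReach grid pattern x) →
    ∃ st, pvReach grid pattern st ∧ pvCellEq grid pattern st = true ∧
      st.2.2 = (pattern.length : Int) - 1 := by
  intro f
  induction f with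
  | zero =>
    intro s v v' he _
    rw [show pvLoopA grid pattern 0 s v = (false, v) from rfl] at he
    simp at he
  | succ f ih =>
    intro s v v' he hr
    cases s with
    | nil =>
      rw [show pvLoopA grid pattern (f + 1) [] v = (false, v) from rfl] at he
      simp at he
    | cons st rest =>
      have hstr : pvReach grid pattern st := hr st (by simp)
      have hrest : ∀ x ∈ rest, pvReach grid pattern x := fun x hx => hr x (by simp [hx])
      simp only [pvLoopA] at he
      by_cases hcont : PySem.Set.contains v st = true
      · rw [if_pos hcont] at he
        exact ih rest v v' he hrest
      · rw [if_neg hcont] at he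
        by_cases hce : pvCellEq grid pattern st = true
        · rw [if_pos hce] at he
          by_cases hfin : (st.2.2 == (pattern.length : Int) - 1) = true
          · exact ⟨st, hstr, hce, by simpa using hfin⟩
          · rw [if_neg hfin] at he
            refine ih _ _ v' he ?_
            intro x hx
            rcases List.mem_append.mp hx with h | h
            · rcases (mem_pvSuccs grid st x).mp h with ⟨d, hd, hin, rfl⟩
              obtain ⟨k, hk, hRN⟩ := hstr
              refine ⟨k + 1, by dsimp only; omega, ?_⟩
              refine ⟨by simpa using hin, d, hd, ?_, ?_⟩
              · dsimp only
                rw [show st.1 + d.1 - d.1 = st.1 by ring, show st.2.1 + d.2 - d.2 = st.2.1 by ring]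
                exact hRN
              · dsimp only
                rw [show st.1 + d.1 - d.1 = st.1 by ring, show st.2.1 + d.2 - d.2 = st.2.1 by ring, ← hk]
                exact hce
            · exact hrest x h
        · rw [if_neg hce] at he
          exact ih _ _ v' he hrest

-- a reachable matching state yields a good start cell
theorem pvReach_good (grid : List (List Int)) (pattern : List Int) :
    ∀ (k : Nat) (i j : Int), pvReachN grid pattern k i j → pvGood grid pattern k i j = true →
    ∃ c ∈ pvCellsB (grid.length : Int) ((grid.headD []).length : Int),
      pvGood grid pattern 0 c.1 c.2 = true := by
  intro k
  induction k with
  | zero =>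
    intro i j hR hg
    have hin : pvInB grid i j = true := hR
    simp only [pvInB, Bool.and_eq_true, decide_eq_true_eq] at hin
    exact ⟨(i, j), (mem_pvCellsB _ _ _).mpr ⟨hin.1.1.1, hin.1.1.2, hin.1.2, hin.2⟩, hg⟩
  | succ k ih =>
    intro i j hR hg
    obtain ⟨-, d, hd, hRN, hce⟩ := hR
    have hlt : k + 1 < pattern.length := (pvGood_parts grid pattern (k + 1) i j hg).2.2
    have hg' : pvGood grid pattern k (i - d.1) (j - d.2) = true := by
      rw [pvGood_eq]
      rw [if_pos (by omega)]
      refine (Bool.and_eq_true _ _).mpr ⟨(Bool.and_eq_true _ _).mpr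
        ⟨pvReachN_inB grid pattern k _ _ hRN, hce⟩, ?_⟩
      refine List.any_eq_true.mpr ⟨d, hd, ?_⟩
      rw [show i - d.1 + d.1 = i by ring, show j - d.2 + d.2 = j by ring]
      exact hg
    exact ih (i - d.1) (j - d.2) hRN hg'

-- a state inside a closed, final-free visited set is not good
theorem pvDead (grid : List (List Int)) (pattern : List Int) (v : List (Int × Int × Int))
    (hC : ∀ x ∈ v, pvCellEq grid pattern x = true → x.2.2 ≠ (pattern.length : Int) - 1 ∧
        ∀ y ∈ pvSuccs grid x, y ∈ v) :
    ∀ (m k : Nat) (i j : Int), pattern.length - k = m → (i, j, (k : Int)) ∈ v →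
      pvGood grid pattern k i j = false := by
  intro m
  induction m using Nat.strong_induction_on with
  | _ m ih =>
    intro k i j hm hv
    by_contra hgt
    have hg : pvGood grid pattern k i j = true := by
      cases h : pvGood grid pattern k i j
      · exact absurd h hgt
      · rfl
    obtain ⟨hin, hce, hklt⟩ := pvGood_parts grid pattern k i j hg
    have hCv := hC _ hv hce
    by_cases hfin : k + 1 < pattern.length
    · rw [pvGood_eq, if_pos hfin] at hg
      simp only [Bool.and_eq_true] at hg
      obtain ⟨d, hd, hgd⟩ := List.any_eq_true.mp hg.2
      have hin' : pvInB grid (i + d.1) (j + d.2) = true := by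
        rw [pvGood_eq] at hgd
        simp only [Bool.and_eq_true] at hgd
        exact hgd.1.1
      have hmem : ((i + d.1, j + d.2, ((k : Int) + 1)) : Int × Int × Int) ∈ pvSuccs grid (i, j, (k : Int)) := by
        rw [mem_pvSuccs]
        exact ⟨d, hd, hin', rfl⟩
      have hvm : ((i + d.1, j + d.2, (((k + 1 : Nat) : Int))) : Int × Int × Int) ∈ v := by
        have := hCv.2 _ hmem
        simpa [Int.natCast_succ] using this
      have := ih (pattern.length - (k + 1)) (by omega) (k + 1) (i + d.1) (j + d.2) rfl hvm
      rw [this] at hgd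
      exact Bool.false_ne_true hgd
    · have hkeq : k + 1 = pattern.length := by omega
      have : (k : Int) = (pattern.length : Int) - 1 := by omega
      exact hCv.1 this

-- the outer double loop
theorem pvOuter (grid : List (List Int)) (pattern : List Int) (F : Nat)
    (hF : ∀ (v : PySem.Set (Int × Int × Int)) (st : Int × Int × Int), pvMu grid pattern v [st] ≤ F) :
    ∀ (cs : List (Int × Int)) (acc : Bool × PySem.Set (Int × Int × Int)),
    (∀ c ∈ cs, pvInB grid c.1 c.2 = true) →
    (acc.1 = true → ∃ st, pvReach grid pattern st ∧ pvCellEq grid pattern st = true ∧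
      st.2.2 = (pattern.length : Int) - 1) →
    (acc.1 = false → List.Nodup acc.2 ∧ (∀ x ∈ acc.2, pvBoxP grid pattern x) ∧
      (∀ x ∈ acc.2, pvCellEq grid pattern x = true → x.2.2 ≠ (pattern.length : Int) - 1 ∧
        ∀ y ∈ pvSuccs grid x, y ∈ acc.2)) →
    (let r := cs.foldl (fun a c => if a.1 then a
        else pvLoopA grid pattern F [(c.1, c.2, 0)] a.2) acc
     (acc.1 = true → r.1 = true) ∧
     (r.1 = true → ∃ st, pvReach grid pattern st ∧ pvCellEq grid pattern st = true ∧
        st.2.2 = (pattern.length : Int) - 1) ∧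
     (r.1 = false → List.Nodup r.2 ∧ (∀ x ∈ r.2, pvBoxP grid pattern x) ∧
        (∀ x ∈ r.2, pvCellEq grid pattern x = true → x.2.2 ≠ (pattern.length : Int) - 1 ∧
          ∀ y ∈ pvSuccs grid x, y ∈ r.2) ∧
        (∀ x ∈ acc.2, x ∈ r.2) ∧
        (∀ c ∈ cs, (c.1, c.2, (0 : Int)) ∈ r.2))) := by
  intro cs
  induction cs with
  | nil =>
    intro acc hcs htrue hfalse
    exact ⟨fun h => h, htrue, fun h => ⟨(hfalse h).1, (hfalse h).2.1, (hfalse h).2.2,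
      fun x hx => hx, by simp⟩⟩
  | cons c cs ih =>
    intro acc hcs htrue hfalse
    have hcin : pvInB grid c.1 c.2 = true := hcs c (by simp)
    have hcs' : ∀ x ∈ cs, pvInB grid x.1 x.2 = true := fun x hx => hcs x (by simp [hx])
    simp only [List.foldl_cons]
    by_cases hacc : acc.1 = true
    · rw [if_pos hacc]
      obtain ⟨p1, p2, p3⟩ := ih acc hcs' htrue hfalse
      refine ⟨fun _ => p1 hacc, p2, fun hf => absurd (p1 hacc) (by rw [hf]; simp)⟩
    · rw [if_neg hacc]
      have haccf : acc.1 = false := by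
        cases h : acc.1
        · rfl
        · exact absurd h hacc
      obtain ⟨hnod, hbox, hclosed⟩ := hfalse haccf
      rcases hres : pvLoopA grid pattern F [(c.1, c.2, 0)] acc.2 with ⟨b, v2⟩
      cases b
      · -- inner loop returned False
        have hsb : ∀ x ∈ [((c.1, c.2, (0 : Int)) : Int × Int × Int)], pvBoxP grid pattern x := by
          intro x hx
          simp only [List.mem_singleton] at hx
          subst hx
          simp only [pvInB, Bool.and_eq_true, decide_eq_true_eq] at hcin
          obtain ⟨⟨⟨a1, a2⟩, a3⟩, a4⟩ := hcin
          refine ⟨?_, ?_, ?_, ?_, ?_, ?_⟩ <;> dsimp only [pvBoxP] <;> omega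
        have hSC : ∀ x ∈ acc.2, pvCellEq grid pattern x = true →
            x.2.2 ≠ (pattern.length : Int) - 1 ∧
            ∀ y ∈ pvSuccs grid x, y ∈ acc.2 ∨ y ∈ [((c.1, c.2, (0 : Int)) : Int × Int × Int)] := by
          intro x hx hc
          exact ⟨(hclosed x hx hc).1, fun y hy => Or.inl ((hclosed x hx hc).2 y hy)⟩
        obtain ⟨c1, c2, c3, c4, c5⟩ := pvLoopA_false grid pattern F _ acc.2 v2 hres hsb hbox hnod
          (hF acc.2 _) hSC
        obtain ⟨p1, p2, p3⟩ := ih (false, v2) hcs' (fun h => absurd h (by simp))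
          (fun _ => ⟨c1, c2, c5⟩)
        refine ⟨fun h => absurd h (by rw [haccf]; simp), p2, fun hf => ?_⟩
        obtain ⟨q1, q2, q3, q4, q5⟩ := p3 hf
        refine ⟨q1, q2, q3, fun x hx => q4 x (c3 x hx), fun x hx => ?_⟩
        rcases List.mem_cons.mp hx with rfl | hx'
        · exact q4 _ (c4 _ (by simp))
        · exact q5 x hx'
      · -- inner loop returned True
        have hrs : ∀ x ∈ [((c.1, c.2, (0 : Int)) : Int × Int × Int)], pvReach grid pattern x := by
          intro x hx
          simp only [List.mem_singleton] at hx
          subst hx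
          exact ⟨0, rfl, hcin⟩
        have hex := pvLoopA_true grid pattern F _ acc.2 v2 hres hrs
        obtain ⟨p1, p2, p3⟩ := ih (true, v2) hcs' (fun _ => hex) (fun h => absurd h (by simp))
        exact ⟨fun _ => p1 rfl, p2, fun hf => absurd (p1 rfl) (by rw [hf]; simp)⟩

-- A computes the spec
theorem pvA_spec (grid : List (List Int)) (pattern : List Int) :
    is_pattern_contained_in_grid grid pattern = pvSpec grid pattern := by
  unfold is_pattern_contained_in_grid
  dsimp only
  rw [show (fun (acc : Bool × PySem.Set (Int × Int × Int)) (i : Int) =>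
        (PySem.List.pyRange 0 ((grid.headD []).length : Int)).foldl (fun acc2 j =>
          if acc2.1 then acc2
          else pvLoopA grid pattern
            (5 * (grid.length * (grid.headD []).length * (pattern.length + 1) + 1) + 1)
            [(i, j, 0)] acc2.2) acc) =
      (fun acc i =>
        ((PySem.List.pyRange 0 ((grid.headD []).length : Int)).map (fun j => (i, j))).foldl
          (fun acc2 c =>
            if acc2.1 then acc2
            else pvLoopA grid pattern
              (5 * (grid.length * (grid.headD []).length * (pattern.length + 1) + 1) + 1)
              [(c.1, c.2, 0)] acc2.2) acc) from by
    funext acc i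
    rw [List.foldl_map]]
  rw [← List.foldl_flatMap]
  rw [show (List.flatMap (fun i => List.map (fun j => (i, j))
        (PySem.List.pyRange 0 ((grid.headD []).length : Int)))
        (PySem.List.pyRange 0 (grid.length : Int))) =
      pvCellsB (grid.length : Int) ((grid.headD []).length : Int) from rfl]
  have hF : ∀ (v : PySem.Set (Int × Int × Int)) (st : Int × Int × Int),
      pvMu grid pattern v [st] ≤
        5 * (grid.length * (grid.headD []).length * (pattern.length + 1) + 1) + 1 := by
    intro v st
    unfold pvMu
    have := pvGamma_len grid pattern
    simp only [List.length_singleton]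
    omega
  obtain ⟨p1, p2, p3⟩ := pvOuter grid pattern _ hF
    (pvCellsB (grid.length : Int) ((grid.headD []).length : Int))
    (false, (PySem.Set.empty : PySem.Set (Int × Int × Int)))
    (fun c hc => by
      rcases (mem_pvCellsB _ _ c).mp hc with ⟨h1, h2, h3, h4⟩
      simp only [pvInB, Bool.and_eq_true, decide_eq_true_eq]
      exact ⟨⟨⟨h1, h2⟩, h3⟩, h4⟩)
    (fun h => absurd h (by simp))
    (fun _ => ⟨List.nodup_nil, by simp [PySem.Set.empty], by simp [PySem.Set.empty]⟩)
  set r := (pvCellsB (grid.length : Int) ((grid.headD []).length : Int)).foldl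
      (fun a c => if a.1 then a
        else pvLoopA grid pattern
          (5 * (grid.length * (grid.headD []).length * (pattern.length + 1) + 1) + 1)
          [(c.1, c.2, 0)] a.2)
      (false, (PySem.Set.empty : PySem.Set (Int × Int × Int))) with hr
  cases hb : r.1
  · -- no early return: every start state is dead
    obtain ⟨q1, q2, q3, q4, q5⟩ := p3 hb
    symm
    unfold pvSpec
    rw [List.any_eq_false]
    intro c hc hx
    rw [pvDead grid pattern r.2 q3 pattern.length 0 c.1 c.2 (by omega) (q5 c hc)] at hx
    exact Bool.false_ne_true hx

  · -- early return True: a reachable final state exists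
    obtain ⟨st, ⟨k, hk2, hRN⟩, hce, hfin⟩ := p2 hb
    have hkL : k + 1 = pattern.length := by omega
    have hst : ((st.1, st.2.1, (k : Int)) : Int × Int × Int) = st := by
      rw [← hk2]
    have hgood : pvGood grid pattern k st.1 st.2.1 = true := by
      rw [pvGood_eq, if_neg (by omega)]
      refine (Bool.and_eq_true _ _).mpr ⟨(Bool.and_eq_true _ _).mpr
        ⟨pvReachN_inB grid pattern k _ _ hRN, by rw [hst]; exact hce⟩, by simp [hkL]⟩
    obtain ⟨c, hcm, hcg⟩ := pvReach_good grid pattern k st.1 st.2.1 hRN hgood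
    symm
    unfold pvSpec
    rw [List.any_eq_true]
    exact ⟨c, hcm, hcg⟩

-- helper facts for the B side
theorem pvHitB_eq (grid : List (List Int)) (pattern : List Int) (n : Nat)
    (hn : n < pattern.length) (c : Int × Int) :
    pvHitB grid (pattern[n]) c = pvCellEq grid pattern (c.1, c.2, (n : Int)) := by
  unfold pvHitB pvCellEq
  rw [show PySem.List.pyGet? pattern ((n : Nat) : Int) = some (pattern[n]) from by
    rw [pvGet_pos pattern n (by omega) (by exact_mod_cast hn)]
    simp]
  cases hl : (PySem.List.pyGet? grid c.1).bind (fun row => PySem.List.pyGet? row c.2) with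
  | none => rfl
  | some g =>
    dsimp only
    by_cases hgx : g = pattern[n]
    · simp [hgx]
    · simp [hgx, Ne.symm hgx]

theorem pvGood_mem_cells (grid : List (List Int)) (pattern : List Int) (k : Nat) (i j : Int)
    (h : pvGood grid pattern k i j = true) :
    ((i, j) : Int × Int) ∈ pvCellsB (grid.length : Int) ((grid.headD []).length : Int) := by
  have hin := (pvGood_parts grid pattern k i j h).1
  simp only [pvInB, Bool.and_eq_true, decide_eq_true_eq] at hin
  exact (mem_pvCellsB _ _ _).mpr ⟨hin.1.1.1, hin.1.1.2, hin.1.2, hin.2⟩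

-- the backward DP fold: cur describes exactly the cells that are good at level n
theorem pvFoldB (grid : List (List Int)) (pattern : List Int) :
    ∀ (n : Nat), n < pattern.length →
    ∀ (cur : PySem.Set (Int × Int)),
    (∀ c : Int × Int, c ∈ cur ↔ (c ∈ pvCellsB (grid.length : Int) ((grid.headD []).length : Int) ∧
        pvGood grid pattern n c.1 c.2 = true)) →
    ∀ c : Int × Int,
      c ∈ ((pattern.take n).reverse.foldl
          (pvStepB grid (pvCellsB (grid.length : Int) ((grid.headD []).length : Int))) cur) ↔
      (c ∈ pvCellsB (grid.length : Int) ((grid.headD []).length : Int) ∧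
        pvGood grid pattern 0 c.1 c.2 = true) := by
  intro n
  induction n with
  | zero =>
    intro _ cur hcur c
    simpa using hcur c
  | succ n ihn =>
    intro hn cur hcur c
    rw [show pattern.take (n + 1) = pattern.take n ++ [pattern[n]'(by omega)] from by
      rw [List.take_add_one, List.getElem?_eq_getElem (by omega : n < pattern.length)]
      rfl]
    rw [List.reverse_append, List.reverse_singleton, List.singleton_append, List.foldl_cons]
    refine ihn (by omega) _ ?_ c
    intro c'
    unfold pvStepB
    rw [PySem.Set.mem_ofList, List.mem_filter]
    constructor
    · rintro ⟨hmem, hp⟩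
      simp only [Bool.and_eq_true] at hp
      refine ⟨hmem, ?_⟩
      rw [pvGood_eq, if_pos (by omega : n + 1 < pattern.length)]
      have hin : pvInB grid c'.1 c'.2 = true := by
        rcases (mem_pvCellsB _ _ c').mp hmem with ⟨h1, h2, h3, h4⟩
        simp only [pvInB, Bool.and_eq_true, decide_eq_true_eq]
        exact ⟨⟨⟨h1, h2⟩, h3⟩, h4⟩
      refine (Bool.and_eq_true _ _).mpr ⟨(Bool.and_eq_true _ _).mpr ⟨hin, ?_⟩, ?_⟩
      · rw [← pvHitB_eq grid pattern n (by omega) c']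
        exact hp.1
      · obtain ⟨d, hd, hcd⟩ := List.any_eq_true.mp hp.2
        refine List.any_eq_true.mpr ⟨d, hd, ?_⟩
        rw [PySem.Set.contains_eq_decide, decide_eq_true_eq] at hcd
        exact ((hcur _).mp hcd).2
    · rintro ⟨hmem, hg⟩
      refine ⟨hmem, ?_⟩
      rw [pvGood_eq, if_pos (by omega : n + 1 < pattern.length)] at hg
      simp only [Bool.and_eq_true] at hg
      obtain ⟨⟨hin, hce⟩, hany⟩ := hg
      simp only [Bool.and_eq_true]
      refine ⟨by rw [pvHitB_eq grid pattern n (by omega) c']; exact hce, ?_⟩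
      obtain ⟨d, hd, hgd⟩ := List.any_eq_true.mp hany
      refine List.any_eq_true.mpr ⟨d, hd, ?_⟩
      rw [PySem.Set.contains_eq_decide, decide_eq_true_eq]
      exact (hcur _).mpr ⟨pvGood_mem_cells grid pattern (n + 1) _ _ hgd, hgd⟩

-- B computes the spec
theorem pvB_spec (grid : List (List Int)) (pattern : List Int) :
    is_pattern_contained_in_grid_alt grid pattern = pvSpec grid pattern := by
  unfold is_pattern_contained_in_grid_alt
  by_cases hg : (grid.isEmpty || (grid.headD []).isEmpty) = true
  · rw [if_pos hg]
    symm
    unfold pvSpec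
    rw [List.any_eq_false]
    intro c hc
    rw [mem_pvCellsB] at hc
    simp only [Bool.or_eq_true, List.isEmpty_iff_length_eq_zero] at hg
    omega
  · rw [if_neg hg]
    dsimp only
    by_cases hp : pattern = []
    · subst hp
      rw [show PySem.List.pyGet? ([] : List Int) (-1) = none from rfl]
      simp only [List.dropLast_nil, List.reverse_nil, List.foldl_nil]
      rw [show (List.filter (fun c => false)
          (pvCellsB (grid.length : Int) ((grid.headD []).length : Int))) = [] from by
        simp]
      rw [show (PySem.Set.ofList ([] : List (Int × Int))).isEmpty = true from rfl]
      symm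
      unfold pvSpec
      simp only [Bool.not_true]
      rw [List.any_eq_false]
      intro c hc hx
      have := (pvGood_parts grid [] 0 c.1 c.2 hx).2.2
      simp at this
    · have hL : 1 ≤ pattern.length := by
        cases pattern
        · exact absurd rfl hp
        · simp
      have hget : PySem.List.pyGet? pattern (-1) =
          some (pattern[pattern.length - 1]'(by omega)) := pvGet_neg_one pattern hp
      rw [hget]
      dsimp only
      have hcur0 : ∀ c : Int × Int,
          c ∈ (PySem.Set.ofList ((pvCellsB (grid.length : Int) ((grid.headD []).length : Int)).filter
            (fun c => pvHitB grid (pattern[pattern.length - 1]'(by omega)) c))) ↔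
          (c ∈ pvCellsB (grid.length : Int) ((grid.headD []).length : Int) ∧
            pvGood grid pattern (pattern.length - 1) c.1 c.2 = true) := by
        intro c
        rw [PySem.Set.mem_ofList, List.mem_filter]
        constructor
        · rintro ⟨hmem, hhit⟩
          refine ⟨hmem, ?_⟩
          rw [pvGood_eq, if_neg (by omega)]
          have hin : pvInB grid c.1 c.2 = true := by
            rcases (mem_pvCellsB _ _ c).mp hmem with ⟨h1, h2, h3, h4⟩
            simp only [pvInB, Bool.and_eq_true, decide_eq_true_eq]
            exact ⟨⟨⟨h1, h2⟩, h3⟩, h4⟩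
          refine (Bool.and_eq_true _ _).mpr ⟨(Bool.and_eq_true _ _).mpr ⟨hin, ?_⟩, by
            simp; omega⟩
          rw [← pvHitB_eq grid pattern (pattern.length - 1) (by omega) c]
          exact hhit
        · rintro ⟨hmem, hgd⟩
          refine ⟨hmem, ?_⟩
          rw [pvGood_eq, if_neg (by omega)] at hgd
          simp only [Bool.and_eq_true] at hgd
          rw [pvHitB_eq grid pattern (pattern.length - 1) (by omega) c]
          exact hgd.1.2
      have hchar := pvFoldB grid pattern (pattern.length - 1) (by omega) _ hcur0
      rw [List.dropLast_eq_take]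
      cases hs : (pvCellsB (grid.length : Int) ((grid.headD []).length : Int)).any
          (fun c => pvGood grid pattern 0 c.1 c.2)
      · unfold pvSpec
        rw [hs]
        simp only [Bool.not_eq_false']
        rw [List.isEmpty_iff, List.eq_nil_iff_forall_not_mem]
        intro c hc
        obtain ⟨hcm, hcg⟩ := (hchar c).mp hc
        rw [List.any_eq_false] at hs
        exact hs c hcm hcg
      · unfold pvSpec
        rw [hs]
        simp only [Bool.not_eq_true']
        obtain ⟨c, hcm, hcg⟩ := List.any_eq_true.mp hs
        have hc := (hchar c).mpr ⟨hcm, hcg⟩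
        rw [List.isEmpty_eq_false_iff_exists_mem]
        exact ⟨c, hc⟩

-- ===== VERDICT (by name: the statement is the Claim_ definition above) =====
theorem is_pattern_contained_in_grid_spec : Claim_equal_is_pattern_contained_in_grid := by
  intro grid pattern _ _
  unfold Spec_is_pattern_contained_in_grid
  rw [pvA_spec, pvB_spec]
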